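-- pv_equiv track=rewrite | github.com/GurIlVik/web | collector/personalpage/views.py | func_str_for_list
-- ===== SOURCE A (Python) =====
-- def func_str_for_list(inlist):
--     res = []
--     string = ''
--     for i, elem in enumerate(inlist):
--         if i >= 2 and i != len(inlist)-1:
--             if elem not in ["'", " ", ","]:
--                 string += elem
--             elif elem == "'" and string != '':
--                 res.append(string)
--                 string = ''
--     return res
-- ===== SOURCE B (Python) =====
-- def func_str_for_list(inlist):
--     # Filter once, then repeatedly split the list at the first quote mark;
--     # the segment before each quote is joined and emitted if non-empty.
--     mid = [e for e in inlist[2:-1] if e not in (" ", ",")]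
--     res = []
--     while "'" in mid:
--         k = mid.index("'")
--         tok = ''.join(mid[:k])
--         if tok:
--             res.append(tok)
--         mid = mid[k + 1:]
--     return res
-- ===== Notes on version B (the rewrite author's own statement) =====
-- stated objective: simpler
-- what changed: Replaces A's per-element state machine (enumerate with index guards and a pending-string accumulator) by slicing off the first two and last elements, filtering out spaces and commas once, and repeatedly splitting the remainder at the first quote mark, joining each segment into one token.
import Mathlib
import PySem

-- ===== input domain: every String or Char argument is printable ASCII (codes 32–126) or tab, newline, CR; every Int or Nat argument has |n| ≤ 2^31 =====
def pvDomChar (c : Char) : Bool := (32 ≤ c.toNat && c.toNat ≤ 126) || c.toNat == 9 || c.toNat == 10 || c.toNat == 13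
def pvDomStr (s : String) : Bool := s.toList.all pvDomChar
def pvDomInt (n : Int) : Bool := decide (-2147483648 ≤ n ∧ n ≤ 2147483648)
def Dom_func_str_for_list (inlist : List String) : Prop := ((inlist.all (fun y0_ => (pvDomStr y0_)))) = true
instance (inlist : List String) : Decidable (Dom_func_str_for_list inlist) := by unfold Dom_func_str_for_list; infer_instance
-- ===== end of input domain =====

-- B replaces A's per-element state machine by filter-then-split-at-quotes; objective: simpler.

-- ===== PORT A =====
-- the body of A's for-loop, over (index, elem) pairs from enumerate
def aStep (len : Int) (st : List String × String) (p : Int × String) : List String × String :=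
  if 2 ≤ p.1 ∧ p.1 ≠ len - 1 then
    if p.2 ∉ ["'", " ", ","] then (st.1, st.2 ++ p.2)
    else if p.2 = "'" ∧ st.2 ≠ "" then (st.1 ++ [st.2], "")
    else st
  else st

def func_str_for_list (inlist : List String) : List String :=
  ((PySem.List.enumerate inlist 0).foldl (aStep (inlist.length : Int)) ([], "")).1

-- ===== PORT B =====
-- 'while "'" in mid: k = mid.index("'"); …' : the membership test and index are
-- combined into one match on index? (some k ↔ the quote is present).
-- mid[:k] / mid[k+1:] with k ≥ 0 are List.take k / List.drop (k+1) (PySem.List.slice_to / slice_from).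
def bLoop (mid : List String) (res : List String) : List String :=
  match h : PySem.List.index? mid "'" with
  | none => res
  | some k =>
    let tok := PySem.Str.join "" (List.take k mid)
    bLoop (List.drop (k + 1) mid) (if tok = "" then res else res ++ [tok])
termination_by mid.length
decreasing_by
  obtain ⟨hk, -, -⟩ := PySem.List.getElem_of_index?_eq_some h
  simp [List.length_drop]; omega

def func_str_for_list_alt (inlist : List String) : List String :=
  bLoop ((PySem.List.slice inlist (some 2) (some (-1))).filter
           (fun e => !(e == " " || e == ","))) []

-- ===== PRECONDITION & SPEC =====
def Spec_func_str_for_list (inlist : List String) (out : List String) : Prop := out = func_str_for_list_alt inlist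
instance (inlist : List String) (out : List String) : Decidable (Spec_func_str_for_list inlist out) := by unfold Spec_func_str_for_list; infer_instance

-- ===== CLAIM (what is proved, stated in full; the proofs are below) =====
def Claim_equal_func_str_for_list : Prop := ∀ (inlist : List String), Dom_func_str_for_list inlist → Spec_func_str_for_list inlist (func_str_for_list inlist)

-- ===== LEMMAS AND PROOFS =====

-- common characterisation: the (emitted tokens, pending string) after scanning a list
def coreP : List String → String → List String × String
  | [], s => ([], s)
  | e :: t, s =>
    if e = "'" then
      (if s = "" then coreP t "" else ((s :: (coreP t "").1), (coreP t "").2))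
    else if e = " " ∨ e = "," then coreP t s
    else coreP t (s ++ e)

-- the unguarded loop body of A
def coreStep (st : List String × String) (e : String) : List String × String :=
  if e ∉ ["'", " ", ","] then (st.1, st.2 ++ e)
  else if e = "'" ∧ st.2 ≠ "" then (st.1 ++ [st.2], "")
  else st

theorem foldl_coreStep (l : List String) : ∀ (res : List String) (s : String),
    l.foldl coreStep (res, s) = (res ++ (coreP l s).1, (coreP l s).2) := by
  induction l with
  | nil => intro res s; simp [coreP]
  | cons e t ih =>
    intro res s
    by_cases hq : e = "'"
    · subst hq
      by_cases hs : s = ""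
      · subst hs; simp [coreStep, coreP, ih]
      · simp [coreStep, coreP, hs, ih]
    · by_cases hsp : e = " " ∨ e = ","
      · have hmem2 : e ∈ ["'", " ", ","] := by rcases hsp with h | h <;> simp [h]
        have h1 : coreStep (res, s) e = (res, s) := by simp [coreStep, hmem2, hq]
        have h2 : coreP (e :: t) s = coreP t s := by simp [coreP, hq, hsp]
        rw [List.foldl_cons, h1, ih, h2]
      · have hmem : e ∉ ["'", " ", ","] := by
          simp only [List.mem_cons, List.mem_singleton]
          push_neg
          exact ⟨hq, fun h => hsp (Or.inl h), fun h => hsp (Or.inr h), by simp⟩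
        simp [coreStep, coreP, hq, hsp, hmem, ih]

-- guarded fold over enumerate rest j (2 ≤ j, j + |rest| = len) = plain fold over rest.dropLast
theorem foldl_enum (len : Int) : ∀ (rest : List String) (j : Nat) (st : List String × String),
    2 ≤ j → (j : Int) + rest.length = len →
    (PySem.List.enumerate rest (j : Int)).foldl (aStep len) st = rest.dropLast.foldl coreStep st := by
  intro rest
  induction rest with
  | nil => intro j st _ _; simp [PySem.List.enumerate]
  | cons e t ih =>
    intro j st hj hlen
    rw [PySem.List.enumerate_cons]
    cases t with
    | nil =>
      have hguard : ¬ (2 ≤ (j : Int) ∧ (j : Int) ≠ len - 1) := by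
        rintro ⟨-, hne⟩
        apply hne
        simp at hlen
        omega
      have hstep : aStep len st ((j : Int), e) = st := by
        simp only [aStep]; rw [if_neg hguard]
      rw [List.foldl_cons, hstep]
      simp [PySem.List.enumerate_nil]
    | cons e' t' =>
      have hguard : 2 ≤ (j : Int) ∧ (j : Int) ≠ len - 1 := by
        simp at hlen; constructor <;> [exact_mod_cast hj; omega]
      have hstep : aStep len st ((j : Int), e) = coreStep st e := by
        simp only [aStep, coreStep, if_pos hguard]
      have : ((j : Int) + 1) = ((j + 1 : Nat) : Int) := by push_cast; ring
      rw [List.foldl_cons, hstep, this, ih (j + 1) _ (by omega) (by simp only [List.length_cons] at hlen ⊢; push_cast at hlen ⊢; omega)]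
      simp [List.dropLast]

-- a list with no quote emits nothing
theorem coreP_no_quote : ∀ (l : List String) (s : String), "'" ∉ l → (coreP l s).1 = [] := by
  intro l
  induction l with
  | nil => intro s _; simp [coreP]
  | cons e t ih =>
    intro s hn
    have he : e ≠ "'" := fun h => hn (by simp [h])
    have ht : "'" ∉ t := fun h => hn (List.mem_cons_of_mem _ h)
    by_cases hsp : e = " " ∨ e = ","
    · simp [coreP, he, hsp, ih _ ht]
    · simp [coreP, he, hsp, ih _ ht]

-- "".join over cons
theorem join_cons (e : String) (t : List String) :
    PySem.Str.join "" (e :: t) = e ++ PySem.Str.join "" t := by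
  rw [← String.toList_inj]
  cases t with
  | nil => simp [PySem.Str.toList_join, PySem.Chars.join_singleton, PySem.Chars.join_nil]
  | cons f t' => simp [PySem.Str.toList_join, PySem.Chars.join_cons_cons]

theorem join_nil_str : PySem.Str.join "" ([] : List String) = "" := by
  rw [← String.toList_inj]
  simp [PySem.Str.toList_join, PySem.Chars.join_nil]

theorem str_append_empty (s : String) : s ++ "" = s := by
  simp

-- splitting coreP at the first quote
theorem coreP_split : ∀ (pre : List String) (suf : List String) (s : String),
    "'" ∉ pre → (∀ e ∈ pre, ¬(e = " " ∨ e = ",")) →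
    (coreP (pre ++ "'" :: suf) s).1 =
      (if s ++ PySem.Str.join "" pre = "" then [] else [s ++ PySem.Str.join "" pre])
        ++ (coreP suf "").1 := by
  intro pre
  induction pre with
  | nil =>
    intro suf s _ _
    rw [join_nil_str, str_append_empty]
    by_cases hs : s = "" <;> simp [coreP, hs]
  | cons e t ih =>
    intro suf s hq hsp
    have he : e ≠ "'" := fun h => hq (by simp [h])
    have hesp : ¬(e = " " ∨ e = ",") := hsp e (by simp)
    have ht : "'" ∉ t := fun h => hq (List.mem_cons_of_mem _ h)
    have htsp : ∀ x ∈ t, ¬(x = " " ∨ x = ",") := fun x hx => hsp x (List.mem_cons_of_mem _ hx)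
    have : coreP ((e :: t) ++ "'" :: suf) s = coreP (t ++ "'" :: suf) (s ++ e) := by
      simp [coreP, he, hesp]
    rw [this, ih suf (s ++ e) ht htsp, join_cons]
    have : s ++ e ++ PySem.Str.join "" t = s ++ (e ++ PySem.Str.join "" t) := by
      rw [← String.toList_inj]; simp
    rw [this]

-- filtering out spaces and commas does not change coreP
theorem coreP_filter : ∀ (l : List String) (s : String),
    coreP (l.filter (fun e => !(e == " " || e == ","))) s = coreP l s := by
  intro l
  induction l with
  | nil => intro s; simp
  | cons e t ih =>
    intro s
    by_cases hsp : e = " " ∨ e = ","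
    · rw [List.filter_cons_of_neg (by rcases hsp with h | h <;> simp [h])]
      have h2 : coreP (e :: t) s = coreP t s := by
        have he : e ≠ "'" := by rcases hsp with h | h <;> simp [h]
        simp [coreP, he, hsp]
      rw [h2, ih]
    · have hsp' : ¬(e = " " ∨ e = ",") := hsp
      push_neg at hsp
      rw [List.filter_cons_of_pos (by simp [hsp.1, hsp.2])]
      by_cases hq : e = "'"
      · subst hq
        by_cases hs : s = ""
        · rw [show coreP ("'" :: t.filter (fun e => !(e == " " || e == ","))) s
                = coreP (t.filter (fun e => !(e == " " || e == ","))) "" by simp [coreP, hs],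
              show coreP ("'" :: t) s = coreP t "" by simp [coreP, hs], ih]
        · rw [show coreP ("'" :: t.filter (fun e => !(e == " " || e == ","))) s
                = ((s :: (coreP (t.filter (fun e => !(e == " " || e == ","))) "").1),
                   (coreP (t.filter (fun e => !(e == " " || e == ","))) "").2) by simp [coreP, hs],
              show coreP ("'" :: t) s = ((s :: (coreP t "").1), (coreP t "").2) by simp [coreP, hs], ih]
      · rw [show coreP (e :: t.filter (fun e => !(e == " " || e == ","))) s
              = coreP (t.filter (fun e => !(e == " " || e == ","))) (s ++ e) by simp [coreP, hq, hsp'],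
            show coreP (e :: t) s = coreP t (s ++ e) by simp [coreP, hq, hsp'], ih]

theorem bLoop_nil (res : List String) : bLoop [] res = res := by
  rw [bLoop]
  rfl

-- bLoop computes the emitted tokens of coreP (on space/comma-free input)
theorem bLoop_eq : ∀ (n : Nat) (mid res : List String), mid.length ≤ n →
    "'" ∉ (mid.filter (fun e => (e == " " || e == ","))) →
    (∀ e ∈ mid, ¬(e = " " ∨ e = ",")) →
    bLoop mid res = res ++ (coreP mid "").1 := by
  intro n
  induction n with
  | zero =>
    intro mid res hlen _ _
    have : mid = [] := List.length_eq_zero_iff.mp (Nat.le_zero.mp hlen)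
    subst this
    rw [bLoop_nil]; simp [coreP]
  | succ m ih =>
    intro mid res hlen _ hsp
    rw [bLoop]
    cases h : PySem.List.index? mid "'" with
    | none =>
      have hq : "'" ∉ mid := (PySem.List.index?_eq_none_iff _ _).mp h
      rw [coreP_no_quote mid "" hq]; simp
    | some k =>
      obtain ⟨pre, suf, hm, hk, hnq⟩ := (PySem.List.index?_eq_some_iff mid "'" k).mp h
      have htake : List.take k mid = pre := by
        rw [hm, ← hk]; simp
      have hdrop : List.drop (k + 1) mid = suf := by
        rw [hm, ← hk,
          show pre ++ "'" :: suf = (pre ++ ["'"]) ++ suf by simp,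
          show pre.length + 1 = (pre ++ ["'"]).length by simp, List.drop_left]
      have hsufsp : ∀ e ∈ suf, ¬(e = " " ∨ e = ",") := by
        intro e hex; exact hsp e (by rw [hm]; simp [hex])
      have hpresp : ∀ e ∈ pre, ¬(e = " " ∨ e = ",") := by
        intro e hex; exact hsp e (by rw [hm]; simp [hex])
      have hlensuf : suf.length ≤ m := by
        have := congrArg List.length hm
        simp at this; omega
      have hsuffilter : "'" ∉ (suf.filter (fun e => (e == " " || e == ","))) := by
        intro hc
        have := List.of_mem_filter hc
        simp at this
      simp only [htake, hdrop]
      rw [ih suf _ hlensuf hsuffilter hsufsp]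
      rw [hm, coreP_split pre suf "" hnq hpresp]
      have hemp : ("" : String) ++ PySem.Str.join "" pre = PySem.Str.join "" pre := by simp
      rw [hemp]
      by_cases htok : PySem.Str.join "" pre = "" <;> simp [htok]

-- the slice inlist[2:-1] on a list of length ≥ 2
theorem slice_two_neg_one (x y : String) (rest : List String) :
    PySem.List.slice (x :: y :: rest) (some 2) (some (-1)) = rest.dropLast := by
  simp [PySem.List.slice, PySem.List.clampIdx]
  rw [if_neg (by omega : ¬((rest.length : Int) + 1 < 0)), List.dropLast_eq_take,
    show rest.length + 1 - 2 = rest.length - 1 by omega]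

theorem filter_no_quote (l : List String) :
    "'" ∉ (l.filter (fun e => !(e == " " || e == ","))).filter (fun e => (e == " " || e == ",")) := by
  intro hc
  have := List.of_mem_filter hc
  have h2 := List.of_mem_filter (List.mem_of_mem_filter hc)
  simp at this h2

theorem filter_spacefree (l : List String) :
    ∀ e ∈ l.filter (fun e => !(e == " " || e == ",")), ¬(e = " " ∨ e = ",") := by
  intro e he
  have := List.of_mem_filter he
  simp at this
  exact fun h => by rcases h with h | h <;> simp [h] at this

-- ===== VERDICT (by name: the statement is the Claim_ definition above) =====
theorem func_str_for_list_spec : Claim_equal_func_str_for_list := by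
  intro inlist _
  unfold Spec_func_str_for_list func_str_for_list func_str_for_list_alt
  match inlist with
  | [] =>
    have hs : PySem.List.slice ([] : List String) (some 2) (some (-1)) = [] := by
      simp [PySem.List.slice, PySem.List.clampIdx]
    rw [hs]
    simp [PySem.List.enumerate_nil, bLoop_nil]
  | [x] =>
    have hs : PySem.List.slice [x] (some 2) (some (-1)) = [] := by
      simp [PySem.List.slice, PySem.List.clampIdx]
    rw [hs]
    have hg : ¬ (2 ≤ (0 : Int) ∧ (0 : Int) ≠ (([x] : List String).length : Int) - 1) := by simp
    simp [PySem.List.enumerate_cons, PySem.List.enumerate_nil, aStep, hg, bLoop_nil]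
  | [x, y] =>
    have hs : PySem.List.slice [x, y] (some 2) (some (-1)) = [] := by
      simp [PySem.List.slice, PySem.List.clampIdx]
    rw [hs]
    have h0 : ¬ (2 ≤ (0 : Int) ∧ (0 : Int) ≠ (([x, y] : List String).length : Int) - 1) := by simp
    have h1 : ¬ (2 ≤ (1 : Int) ∧ (1 : Int) ≠ (([x, y] : List String).length : Int) - 1) := by simp
    simp [PySem.List.enumerate_cons, PySem.List.enumerate_nil, aStep, h0, h1, bLoop_nil]
  | x :: y :: rest =>
    set len : Int := ((x :: y :: rest : List String).length : Int) with hlen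
    have h0 : ¬ (2 ≤ (0 : Int) ∧ (0 : Int) ≠ len - 1) := by simp
    have h1 : ¬ (2 ≤ (1 : Int) ∧ (1 : Int) ≠ len - 1) := by simp
    rw [PySem.List.enumerate_cons, PySem.List.enumerate_cons]
    rw [List.foldl_cons, List.foldl_cons]
    simp only [aStep, if_neg h0]
    rw [if_neg (by norm_num : ¬ (2 ≤ ((0 : Int) + 1) ∧ ((0 : Int) + 1) ≠ len - 1))]
    have h2 : ((0 : Int) + 1 + 1) = ((2 : Nat) : Int) := by norm_num
    rw [h2, foldl_enum len rest 2 ([], "") (by omega) (by simp [hlen]; push_cast; ring)]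
    rw [foldl_coreStep]
    rw [slice_two_neg_one]
    rw [bLoop_eq (rest.dropLast.filter (fun e => !(e == " " || e == ","))).length _ []
        (le_refl _) (filter_no_quote _) (filter_spacefree _)]
    rw [coreP_filter]
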